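-- pv_equiv track=rewrite | github.com/KuvaKodes/AI-1-and-2 | Unit 2 Constraint Satisfaction/2 Vardhan Kushaan n_queens_incremental.py | most_conflicted_rows
-- ===== SOURCE A (Python) =====
-- def num_conflicts(board, row_num):
--     tot_conf = 0
--     val = board[row_num]
--     for i in range(row_num):
--         if board[i] == val:
--             tot_conf = tot_conf +1
--     for g in range(row_num+1, len(board)):
--         if board[g] == val:
--             tot_conf = tot_conf +1
--     if row_num > 0:
--         step_counter = 1
--         for back in board[row_num-1::-1]:
--             if back == val - step_counter or back == val + step_counter:
--                 tot_conf = tot_conf +1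
--             step_counter = step_counter+1
--     step_counter = 1
--     for forw in board[row_num+1::]:
--         if forw == val - step_counter or forw == val + step_counter:
--             tot_conf = tot_conf +1
--         step_counter = step_counter+1
--     return tot_conf
--
-- def most_conflicted_rows(board):
--     most_conflicted_rows_list = list()
--     row_to_conflicts = {i : num_conflicts(board, i) for i in range(len(board))}
--     max = 0
--     for g in row_to_conflicts:
--         if row_to_conflicts[g] > max:
--             max = row_to_conflicts[g]
--     for n in row_to_conflicts:
--         if row_to_conflicts[n] == max:
--             most_conflicted_rows_list.append(n)
--     return most_conflicted_rows_list
-- ===== SOURCE B (Python) =====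
-- def most_conflicted_rows(board):
--     # One pass: occupancy counters for columns and both diagonal directions,
--     # then per-row conflict counts derived from the counters.
--     col = {}
--     d1 = {}
--     d2 = {}
--     for i, v in enumerate(board):
--         col[v] = col.get(v, 0) + 1
--         d1[v - i] = d1.get(v - i, 0) + 1
--         d2[v + i] = d2.get(v + i, 0) + 1
--     conf = [col[v] + d1[v - i] + d2[v + i] - 3 for i, v in enumerate(board)]
--     m = max(conf) if conf else 0
--     return [i for i, c in enumerate(conf) if c == m]
-- ===== Notes on version B (the rewrite author's own statement) =====
-- stated objective: faster
-- what changed: Replaces the per-row O(n) conflict scan (num_conflicts called for every row) with a single pass building column/diagonal/anti-diagonal occupancy dicts, deriving each row's conflict count as col[v]+d1[v-i]+d2[v+i]-3.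
import Mathlib
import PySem

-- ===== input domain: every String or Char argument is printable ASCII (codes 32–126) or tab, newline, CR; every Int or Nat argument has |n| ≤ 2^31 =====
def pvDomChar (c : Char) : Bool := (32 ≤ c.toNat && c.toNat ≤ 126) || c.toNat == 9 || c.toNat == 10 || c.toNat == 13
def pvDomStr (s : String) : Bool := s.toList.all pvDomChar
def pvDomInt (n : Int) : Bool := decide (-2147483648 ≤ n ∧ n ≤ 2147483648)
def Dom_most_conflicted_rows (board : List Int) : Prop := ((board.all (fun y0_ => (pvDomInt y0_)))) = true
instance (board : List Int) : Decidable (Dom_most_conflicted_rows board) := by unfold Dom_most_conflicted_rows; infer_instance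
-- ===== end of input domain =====

-- B replaces A's per-row O(n) conflict scan with one pass building column/diagonal/anti-diagonal
-- occupancy dicts and deriving each row's conflicts from them (objective: faster, asymptotic).


-- ===== PORT A =====
-- num_conflicts: the 'none' branch of board[row_num] is Python's IndexError; most_conflicted_rows
-- only calls it with 0 ≤ row_num < len(board), so the branch is unreachable from the entry point,
-- and pyGetD with default 0 inside the loops is likewise exact there (all indices in range).
def num_conflicts (board : List Int) (row_num : Int) : Int :=
  match PySem.List.pyGet? board row_num with
  | none => 0
  | some val =>
    let t1 : Int := (PySem.List.pyRange 0 row_num 1).foldl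
      (fun t i => if PySem.List.pyGetD board i 0 = val then t + 1 else t) 0
    let t2 : Int := (PySem.List.pyRange (row_num + 1) (PySem.List.len board) 1).foldl
      (fun t g => if PySem.List.pyGetD board g 0 = val then t + 1 else t) t1
    let t3 : Int :=
      if row_num > 0 then
        (((PySem.List.slice? board (some (row_num - 1)) none (-1)).getD []).foldl
          (fun (p : Int × Int) back =>
            (if back = val - p.2 ∨ back = val + p.2 then p.1 + 1 else p.1, p.2 + 1)) (t2, 1)).1
      else t2
    ((PySem.List.slice board (some (row_num + 1)) none).foldl
      (fun (p : Int × Int) forw =>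
        (if forw = val - p.2 ∨ forw = val + p.2 then p.1 + 1 else p.1, p.2 + 1)) (t3, 1)).1

def most_conflicted_rows (board : List Int) : List Int :=
  let row_to_conflicts : PySem.Dict Int Int :=
    (PySem.List.pyRange 0 (PySem.List.len board) 1).foldl
      (fun d i => d.insert i (num_conflicts board i)) PySem.Dict.empty
  -- iteration over the dict is iteration over its keys; d[g] is exact as getD since every key is present
  let mx : Int := row_to_conflicts.keys.foldl
    (fun m g => if row_to_conflicts.getD g 0 > m then row_to_conflicts.getD g 0 else m) 0
  row_to_conflicts.keys.foldl
    (fun acc n => if row_to_conflicts.getD n 0 = mx then acc ++ [n] else acc) []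

-- ===== PORT B =====
def most_conflicted_rows_alt (board : List Int) : List Int :=
  let st := (PySem.List.enumerate board 0).foldl
    (fun (s : PySem.Dict Int Int × PySem.Dict Int Int × PySem.Dict Int Int) p =>
      (s.1.insert p.2 (s.1.getD p.2 0 + 1),
       s.2.1.insert (p.2 - p.1) (s.2.1.getD (p.2 - p.1) 0 + 1),
       s.2.2.insert (p.2 + p.1) (s.2.2.getD (p.2 + p.1) 0 + 1)))
    (PySem.Dict.empty, PySem.Dict.empty, PySem.Dict.empty)
  let conf : List Int := (PySem.List.enumerate board 0).map
    (fun p => st.1.getD p.2 0 + st.2.1.getD (p.2 - p.1) 0 + st.2.2.getD (p.2 + p.1) 0 - 3)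
  let m : Int := if conf = [] then 0 else ((PySem.List.max? conf (fun x => x)).getD 0)
  (PySem.List.enumerate conf 0).foldl
    (fun acc p => if p.2 = m then acc ++ [p.1] else acc) []

-- ===== PRECONDITION & SPEC =====
def Spec_most_conflicted_rows (board : List Int) (out : List Int) : Prop := out = most_conflicted_rows_alt board
instance (board : List Int) (out : List Int) : Decidable (Spec_most_conflicted_rows board out) := by unfold Spec_most_conflicted_rows; infer_instance

-- ===== CLAIM (what is proved, stated in full; the proofs are below) =====
def Claim_equal_most_conflicted_rows : Prop := ∀ (board : List Int), Dom_most_conflicted_rows board → Spec_most_conflicted_rows board (most_conflicted_rows board)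

-- ===== LEMMAS AND PROOFS =====
def pvQ (v : Int) (p : Int × Int) : Bool := decide (p.2 = v - p.1 ∨ p.2 = v + p.1)
def pvP (v i : Int) (p : Int × Int) : Bool := decide (p.2 - p.1 = v - i ∨ p.2 + p.1 = v + i)

def pvCnt (board : List Int) (i v : Int) : Int :=
  (board.count v : Int)
  + ((PySem.List.enumerate board 0).countP (fun p => decide (p.2 - p.1 = v - i)) : Int)
  + ((PySem.List.enumerate board 0).countP (fun p => decide (p.2 + p.1 = v + i)) : Int)
  - 3

lemma pv_foldl_step (val : Int) : ∀ (l : List Int) (c s : Int),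
  l.foldl (fun (p : Int × Int) x => (if x = val - p.2 ∨ x = val + p.2 then p.1 + 1 else p.1, p.2 + 1)) (c, s)
  = (c + ((PySem.List.enumerate l s).countP (pvQ val) : Int), s + l.length) := by
  intro l
  induction l with
  | nil => intro c s; simp [PySem.List.enumerate_nil]
  | cons x t ih =>
    intro c s
    simp only [List.foldl_cons, PySem.List.enumerate_cons, List.countP_cons]
    rw [ih]
    by_cases h : x = val - s ∨ x = val + s <;>
      simp [pvQ, h, Prod.ext_iff] <;> omega

lemma pv_shift (q : Int × Int → Bool) : ∀ (l : List Int) (s t : Int),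
  (PySem.List.enumerate l s).countP q = (PySem.List.enumerate l t).countP (fun p => q (p.1 - t + s, p.2)) := by
  intro l
  induction l with
  | nil => intro s t; simp [PySem.List.enumerate_nil]
  | cons x xs ih =>
    intro s t
    simp only [PySem.List.enumerate_cons, List.countP_cons]
    rw [ih (s + 1) (t + 1)]
    have h1 : (t : Int) - t + s = s := by ring
    have h2 : ∀ p : Int × Int, (p.1 - (t+1) + (s+1), p.2) = (p.1 - t + s, p.2) := by
      intro p; simp [Prod.ext_iff]; ring
    simp only [h1, h2]

lemma pv_countP_or (q1 q2 : Int × Int → Bool) : ∀ (l : List (Int × Int)),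
  (∀ p ∈ l, ¬(q1 p = true ∧ q2 p = true)) →
  l.countP (fun p => q1 p || q2 p) = l.countP q1 + l.countP q2 := by
  intro l
  induction l with
  | nil => simp
  | cons x xs ih =>
    intro h
    simp only [List.countP_cons]
    rw [ih (fun p hp => h p (List.mem_cons_of_mem _ hp))]
    have := h x List.mem_cons_self
    cases hq1 : q1 x <;> cases hq2 : q2 x <;> simp [hq1, hq2] at this ⊢ <;> omega


lemma pv_rev_count (val : Int) : ∀ (l : List Int),
  (PySem.List.enumerate l.reverse 1).countP (pvQ val)
  = (PySem.List.enumerate l 0).countP (pvP val (l.length : Int)) := by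
  intro l
  induction l with
  | nil => simp [PySem.List.enumerate_nil]
  | cons a t ih =>
    have hrev : (a :: t).reverse = t.reverse ++ [a] := by simp
    rw [hrev, PySem.List.enumerate_append, List.countP_append,
        PySem.List.enumerate_cons, PySem.List.enumerate_nil]
    simp only [List.countP_cons, List.countP_nil, ih]
    rw [PySem.List.enumerate_cons]
    simp only [List.countP_cons]
    rw [pv_shift (pvP val ((a :: t).length : Int)) t (0 + 1) 0]
    have hpred : (fun p : Int × Int => pvP val ((a :: t).length : Int) (p.1 - 0 + (0 + 1), p.2))
        = pvP val (t.length : Int) := by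
      funext p
      simp only [pvP, List.length_cons]
      rw [decide_eq_decide]
      push_cast
      omega
    rw [hpred]
    have hmid : pvQ val (1 + (t.reverse.length : Int), a)
        = pvP val ((a :: t).length : Int) (0, a) := by
      simp only [pvQ, pvP, List.length_reverse, List.length_cons]
      rw [decide_eq_decide]
      push_cast
      omega
    rw [hmid]
    omega

lemma pv_fwd_count (val t : Int) (l : List Int) :
  (PySem.List.enumerate l 1).countP (pvQ val)
  = (PySem.List.enumerate l (t + 1)).countP (pvP val t) := by
  rw [pv_shift (pvP val t) l (t + 1) 1]
  apply List.countP_congr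
  intro p _
  simp only [pvQ, pvP, decide_eq_true_eq]
  omega

lemma pv_range_count (board : List Int) (val : Int) : ∀ (k : Nat), k ≤ board.length → ∀ (c : Int),
  List.foldl (fun t i => if board.getD i 0 = val then t + 1 else t) c (List.range k)
  = c + (((board.take k).count val : Int)) := by
  intro k
  induction k with
  | zero => intro _ c; simp
  | succ n ih =>
    intro hle c
    rw [List.range_succ, List.foldl_append, ih (by omega) c]
    have hn : n < board.length := by omega
    rw [List.take_add_one]
    simp only [List.foldl_cons, List.foldl_nil, List.getElem?_eq_getElem hn, Option.toList_some,
      List.count_append, List.getD_eq_getElem board 0 hn]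
    by_cases h : board[n] = val <;>
      simp [h] ; omega

lemma pv_slice_rev (xs : List Int) (j : Nat) (hj : j < xs.length) :
  PySem.List.slice? xs (some (j : Int)) none (-1) = some ((xs.take (j + 1)).reverse) := by
  have hstart : PySem.List.sliceIndices xs.length (some (j : Int)) none (-1) = ((j : Int), -1, -1) := by
    simp only [PySem.List.sliceIndices]
    norm_num
    omega
  simp only [PySem.List.slice?, hstart]
  norm_num
  have hif : (List.range (if (-1 : Int) < (j : Int) then j + 1 else 0)) = List.range (j + 1) := by
    rw [if_pos (by omega)]
  rw [hif]
  have hmap : List.filterMap (fun k : Nat => xs[((j : Int) + -(k : Int)).toNat]?) (List.range (j + 1))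
      = List.map (fun k : Nat => xs.getD (j - k) 0) (List.range (j + 1)) := by
    rw [List.filterMap_congr (g := fun k : Nat => (some ∘ fun k : Nat => xs.getD (j - k) 0) k)]
    · exact congrFun List.filterMap_eq_map _
    · intro m hm
      rw [List.mem_range] at hm
      have h1 : ((j : Int) + -(m : Int)).toNat = j - m := by omega
      have h2 : j - m < xs.length := by omega
      rw [h1]
      simp [List.getElem?_eq_getElem h2]
  rw [hmap]
  apply List.ext_getElem
  · simp; omega
  · intro m h1 h2
    simp only [List.getElem_map, List.getElem_range, List.getElem_reverse, List.getElem_take]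
    rw [List.getD_eq_getElem]
    · congr 1
      simp only [List.length_reverse, List.length_take] at h2
      rw [List.length_take]
      omega
    · omega

lemma pv_getD_foldl_insert (f : Int → Int) : ∀ (l : List Int) (d : PySem.Dict Int Int) (g : Int),
  (l.foldl (fun d i => d.insert i (f i)) d).getD g 0 = if g ∈ l then f g else d.getD g 0 := by
  intro l
  induction l with
  | nil => intro d g; simp
  | cons a t ih =>
    intro d g
    rw [List.foldl_cons, ih]
    rw [PySem.Dict.getD_insert]
    by_cases hmem : g ∈ t
    · simp [hmem]
    · by_cases hga : g = a <;> simp [hmem, hga]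

lemma pv_cnt_eq (board : List Int) (k : Nat) (hk : k < board.length) :
  pvCnt board (k : Int) (board.getD k 0)
  = ((board.take k).count (board.getD k 0) : Int) + ((board.drop (k+1)).count (board.getD k 0) : Int)
  + ((PySem.List.enumerate (board.take k) 0).countP (pvP (board.getD k 0) (k : Int)) : Int)
  + ((PySem.List.enumerate (board.drop (k+1)) ((k : Int) + 1)).countP (pvP (board.getD k 0) (k : Int)) : Int) := by
  set v := board.getD k 0 with hv
  have hlen : (board.take k).length = k := by simp; omega
  have hsplit : PySem.List.enumerate board 0
      = PySem.List.enumerate (board.take k) 0 ++ (((k : Int), v) :: PySem.List.enumerate (board.drop (k+1)) ((k : Int) + 1)) := by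
    conv_lhs => rw [← List.take_append_drop k board]
    rw [PySem.List.enumerate_append, List.drop_eq_getElem_cons hk, PySem.List.enumerate_cons, hlen]
    rw [List.getD_eq_getElem board 0 hk] at hv
    rw [← hv]
    norm_num
  have hcnt : board.count v = (board.take k).count v + 1 + (board.drop (k+1)).count v := by
    conv_lhs => rw [← List.take_append_drop k board]
    rw [List.count_append, List.drop_eq_getElem_cons hk, List.count_cons]
    rw [List.getD_eq_getElem board 0 hk] at hv
    simp [← hv]
    omega
  have hdisj1 : ∀ (l : List Int) (s : Int), (s = 0 ∧ l.length ≤ k) ∨ s = (k : Int) + 1 →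
      (PySem.List.enumerate l s).countP (pvP v (k : Int))
      = (PySem.List.enumerate l s).countP (fun p => decide (p.2 - p.1 = v - (k : Int)))
        + (PySem.List.enumerate l s).countP (fun p => decide (p.2 + p.1 = v + (k : Int))) := by
    intro l s hs
    have hfun : pvP v (k : Int) = fun p : Int × Int =>
        (decide (p.2 - p.1 = v - (k : Int)) || decide (p.2 + p.1 = v + (k : Int))) := by
      funext p; simp [pvP]
    rw [hfun]
    apply pv_countP_or
    intro p hp hand
    rw [PySem.List.mem_enumerate_iff] at hp
    obtain ⟨m, hm, rfl⟩ := hp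
    simp only [decide_eq_true_eq] at hand
    rcases hs with ⟨rfl, hle⟩ | rfl <;> omega
  rw [pvCnt, hsplit, hcnt]
  simp only [List.countP_append, List.countP_cons, decide_eq_true_eq]
  rw [hdisj1 (board.take k) 0 (Or.inl ⟨rfl, by omega⟩), hdisj1 (board.drop (k+1)) ((k : Int)+1) (Or.inr rfl)]
  simp only [if_true]
  push_cast
  omega

lemma pv_num_conflicts_eq (board : List Int) (k : Nat) (hk : k < board.length) :
  num_conflicts board (k : Int) = pvCnt board (k : Int) (board.getD k 0) := by
  have hget : PySem.List.pyGet? board (k : Int) = some (board.getD k 0) := by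
    rw [PySem.List.pyGet?_natCast, List.getElem?_eq_getElem hk, List.getD_eq_getElem board 0 hk]
  unfold num_conflicts
  rw [hget]
  split
  next heq => simp at heq
  next val heq =>
    obtain rfl : val = board.getD k 0 := by injection heq with h; omega
    set v := board.getD k 0 with hv
    -- t1: prefix column count
    rw [PySem.List.pyRange_zero_nat k, List.foldl_map]
    simp only [PySem.List.pyGetD_natCast]
    rw [pv_range_count board v k (le_of_lt hk) 0]
    -- t2: suffix column count
    have hlen : PySem.List.len board = (board.length : Int) := by simp [PySem.List.len]
    rw [hlen,
      PySem.List.foldl_pyRange_pyGetD' board 0 (fun t x => if x = v then t + 1 else t) _ (by positivity),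
      PySem.List.foldl_ite_add_one (fun x => x = v)]
    have htn : ((k : Int) + 1).toNat = k + 1 := by omega
    rw [htn]
    have hcp : ∀ l : List Int, l.countP (fun x => decide (x = v)) = l.count v := by
      intro l; rw [List.count_eq_countP]; apply List.countP_congr; intro x _; simp
    rw [hcp]
    -- forward loop
    rw [PySem.List.slice_from board (by positivity), htn, pv_foldl_step v]
    simp only []
    rw [pv_fwd_count v (k : Int) (board.drop (k+1))]
    -- back loop
    rcases Nat.eq_zero_or_pos k with hk0 | hk0
    · subst hk0
      rw [if_neg (by omega)]
      rw [pv_cnt_eq board 0 hk]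
      simp [hv, PySem.List.enumerate_nil, List.getD_eq_getElem?_getD]
    · rw [if_pos (by omega)]
      have hcast : ((k : Int) - 1) = ((k - 1 : Nat) : Int) := by omega
      rw [hcast, pv_slice_rev board (k-1) (by omega)]
      have hsub : k - 1 + 1 = k := by omega
      rw [Option.getD_some, hsub, pv_foldl_step v]
      simp only []
      rw [pv_rev_count v (board.take k)]
      have hlent : ((board.take k).length : Int) = (k : Int) := by simp; omega
      rw [hlent, pv_cnt_eq board k hk]
      ring

def pvMax (board : List Int) : Int :=
  ((PySem.List.pyRange 0 (board.length : Int)).map (fun j => num_conflicts board j)).foldl max 0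

lemma pv_cnt_nonneg (board : List Int) (k : Nat) (hk : k < board.length) :
  0 ≤ pvCnt board (k : Int) (board.getD k 0) := by
  have hvm : board.getD k 0 ∈ board := by
    rw [List.getD_eq_getElem board 0 hk]; exact List.getElem_mem hk
  have h1 : 0 < board.count (board.getD k 0) := List.count_pos_iff.mpr hvm
  have hmem : ((k : Int), board.getD k 0) ∈ PySem.List.enumerate board 0 := by
    rw [PySem.List.mem_enumerate_iff]
    exact ⟨k, hk, by rw [List.getD_eq_getElem board 0 hk]; simp⟩
  have h2 : 0 < (PySem.List.enumerate board 0).countP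
      (fun p => decide (p.2 - p.1 = board.getD k 0 - (k : Int))) :=
    List.countP_pos_iff.mpr ⟨_, hmem, by simp⟩
  have h3 : 0 < (PySem.List.enumerate board 0).countP
      (fun p => decide (p.2 + p.1 = board.getD k 0 + (k : Int))) :=
    List.countP_pos_iff.mpr ⟨_, hmem, by simp⟩
  unfold pvCnt
  omega

lemma pv_conflicts_nonneg (board : List Int) (k : Nat) (hk : k < board.length) :
  0 ≤ num_conflicts board (k : Int) := by
  rw [pv_num_conflicts_eq board k hk]; exact pv_cnt_nonneg board k hk

lemma pv_A_eq (board : List Int) :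
  most_conflicted_rows board
  = (PySem.List.pyRange 0 (board.length : Int)).filter
      (fun g => decide (num_conflicts board g = pvMax board)) := by
  unfold most_conflicted_rows
  have hlen : PySem.List.len board = (board.length : Int) := by simp [PySem.List.len]
  rw [hlen]
  have hd : ∀ g : Int,
      ((PySem.List.pyRange 0 (board.length : Int)).foldl
        (fun d i => d.insert i (num_conflicts board i)) PySem.Dict.empty).getD g 0
      = if g ∈ PySem.List.pyRange 0 (board.length : Int) then num_conflicts board g else 0 := by
    intro g
    rw [pv_getD_foldl_insert]
    simp [PySem.Dict.getD_empty]
  have hkeys : ((PySem.List.pyRange 0 (board.length : Int)).foldl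
        (fun d i => d.insert i (num_conflicts board i)) PySem.Dict.empty).keys
      = PySem.List.pyRange 0 (board.length : Int) := by
    have hitems := PySem.Dict.items_foldl_insert_fresh
      (PySem.List.pyRange 0 (board.length : Int)) (fun i => i) (fun i => num_conflicts board i)
      PySem.Dict.empty (fun a _ => PySem.Dict.contains_empty a)
      (by simpa using PySem.List.nodup_pyRange_one 0 (board.length : Int))
    have hie : (PySem.Dict.empty : PySem.Dict Int Int).items = [] := rfl
    simp only [PySem.Dict.keys, hitems, hie]
    simp [Function.comp_def]
  simp only [hkeys, hd]
  -- the max loop computes pvMax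
  have hmx : (PySem.List.pyRange 0 (board.length : Int)).foldl
      (fun m g => if (if g ∈ PySem.List.pyRange 0 (board.length : Int) then num_conflicts board g else 0) > m
                  then (if g ∈ PySem.List.pyRange 0 (board.length : Int) then num_conflicts board g else 0)
                  else m) 0 = pvMax board := by
    rw [PySem.List.foldl_congr_mem' _ _ (fun m g => max m (num_conflicts board g)) 0]
    · rw [pvMax, List.foldl_map]
    · intro g hg acc
      rw [if_pos hg]
      by_cases h : num_conflicts board g ≤ acc
      · rw [if_neg (by omega), max_eq_left h]
      · rw [if_pos (by omega), max_eq_right (by omega)]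
  rw [hmx]
  rw [PySem.List.foldl_congr_mem' _ _
    (fun acc n => if num_conflicts board n = pvMax board then acc ++ [n] else acc) []]
  · rw [PySem.List.foldl_append_ite_eq_filter (fun n => num_conflicts board n = pvMax board)]
    simp
  · intro g hg acc
    rw [if_pos hg]

lemma pv_B_eq (board : List Int) :
  most_conflicted_rows_alt board
  = (PySem.List.pyRange 0 (board.length : Int)).filter
      (fun g => decide (num_conflicts board g = pvMax board)) := by
  unfold most_conflicted_rows_alt
  rw [PySem.List.foldl_prod_mk
      (f := fun (d : PySem.Dict Int Int) (p : Int × Int) => d.insert p.2 (d.getD p.2 0 + 1))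
      (g := fun (s : PySem.Dict Int Int × PySem.Dict Int Int) (p : Int × Int) =>
        (s.1.insert (p.2 - p.1) (s.1.getD (p.2 - p.1) 0 + 1),
         s.2.insert (p.2 + p.1) (s.2.getD (p.2 + p.1) 0 + 1)))]
  rw [PySem.List.foldl_prod_mk
      (f := fun (d : PySem.Dict Int Int) (p : Int × Int) => d.insert (p.2 - p.1) (d.getD (p.2 - p.1) 0 + 1))
      (g := fun (d : PySem.Dict Int Int) (p : Int × Int) => d.insert (p.2 + p.1) (d.getD (p.2 + p.1) 0 + 1))]
  have h1 : ∀ v : Int, ((PySem.List.enumerate board 0).foldl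
        (fun (d : PySem.Dict Int Int) (p : Int × Int) => d.insert p.2 (d.getD p.2 0 + 1))
        PySem.Dict.empty).getD v 0 = (board.count v : Int) := by
    intro v
    rw [← List.foldl_map (f := fun (p : Int × Int) => p.2)
        (g := fun (d : PySem.Dict Int Int) (x : Int) => d.insert x (d.getD x 0 + 1)),
      PySem.List.map_snd_enumerate, PySem.Dict.getD_foldl_insert_add_one]
    simp [PySem.Dict.getD_empty]
  have h2 : ∀ w : Int, ((PySem.List.enumerate board 0).foldl
        (fun (d : PySem.Dict Int Int) (p : Int × Int) => d.insert (p.2 - p.1) (d.getD (p.2 - p.1) 0 + 1))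
        PySem.Dict.empty).getD w 0
      = ((PySem.List.enumerate board 0).countP (fun p => decide (p.2 - p.1 = w)) : Int) := by
    intro w
    rw [← List.foldl_map (f := fun (p : Int × Int) => p.2 - p.1)
        (g := fun (d : PySem.Dict Int Int) (x : Int) => d.insert x (d.getD x 0 + 1)),
      PySem.Dict.getD_foldl_insert_add_one]
    rw [List.count_eq_countP, List.countP_map, PySem.Dict.getD_empty]
    have : ∀ l : List (Int × Int), List.countP ((fun x => x == w) ∘ fun p : Int × Int => p.2 - p.1) l
        = List.countP (fun p : Int × Int => decide (p.2 - p.1 = w)) l := by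
      intro l; apply List.countP_congr; intro p _; simp
    rw [this]
    omega
  have h3 : ∀ w : Int, ((PySem.List.enumerate board 0).foldl
        (fun (d : PySem.Dict Int Int) (p : Int × Int) => d.insert (p.2 + p.1) (d.getD (p.2 + p.1) 0 + 1))
        PySem.Dict.empty).getD w 0
      = ((PySem.List.enumerate board 0).countP (fun p => decide (p.2 + p.1 = w)) : Int) := by
    intro w
    rw [← List.foldl_map (f := fun (p : Int × Int) => p.2 + p.1)
        (g := fun (d : PySem.Dict Int Int) (x : Int) => d.insert x (d.getD x 0 + 1)),
      PySem.Dict.getD_foldl_insert_add_one]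
    rw [List.count_eq_countP, List.countP_map, PySem.Dict.getD_empty]
    have : ∀ l : List (Int × Int), List.countP ((fun x => x == w) ∘ fun p : Int × Int => p.2 + p.1) l
        = List.countP (fun p : Int × Int => decide (p.2 + p.1 = w)) l := by
      intro l; apply List.countP_congr; intro p _; simp
    rw [this]
    omega
  simp only [h1, h2, h3]
  have hconf : List.map (fun p : Int × Int =>
        (List.count p.2 board : Int)
        + ((List.countP (fun q : Int × Int => decide (q.2 - q.1 = p.2 - p.1)) (PySem.List.enumerate board 0)) : Int)
        + ((List.countP (fun q : Int × Int => decide (q.2 + q.1 = p.2 + p.1)) (PySem.List.enumerate board 0)) : Int)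
        - 3) (PySem.List.enumerate board 0)
      = (PySem.List.pyRange 0 (board.length : Int)).map (fun j => num_conflicts board j) := by
    apply List.ext_getElem
    · simp [PySem.List.length_enumerate, PySem.List.length_pyRange_one]
    · intro m hm1 hm2
      have hmb : m < board.length := by
        simpa [PySem.List.length_enumerate] using hm1
      simp only [List.getElem_map, PySem.List.getElem_enumerate, PySem.List.getElem_pyRange_one]
      have hnc := pv_num_conflicts_eq board m hmb
      rw [List.getD_eq_getElem board 0 hmb] at hnc
      simp only [zero_add]
      exact (by simpa [pvCnt] using hnc.symm)
  rw [hconf]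
  have hm : (if (PySem.List.pyRange 0 (board.length : Int)).map (fun j => num_conflicts board j) = [] then (0:Int)
      else ((PySem.List.max? ((PySem.List.pyRange 0 (board.length : Int)).map (fun j => num_conflicts board j)) (fun x => x)).getD 0))
      = pvMax board := by
    rcases List.eq_nil_or_concat' board with rfl | hne
    · simp [pvMax, PySem.List.pyRange_one_eq_nil]
    · have hpos : (0:Int) < (board.length : Int) := by
        rcases hne with ⟨l, a, rfl⟩; simp
      rw [PySem.List.pyRange_one_cons hpos, List.map_cons]
      rw [if_neg (by simp)]
      rw [PySem.List.max?_id_cons, Option.getD_some]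
      have h0 : (0:Int) ≤ num_conflicts board 0 := by
        have := pv_conflicts_nonneg board 0 (by exact_mod_cast hpos)
        simpa using this
      rw [pvMax, PySem.List.pyRange_one_cons hpos, List.map_cons, List.foldl_cons,
        max_eq_right h0]
  rw [hm]
  rw [PySem.List.enumerate_eq_map_pyRange ((PySem.List.pyRange 0 (board.length : Int)).map (fun j => num_conflicts board j)) 0]
  have hlenR : PySem.List.len ((PySem.List.pyRange 0 (board.length : Int)).map (fun j => num_conflicts board j))
      = (board.length : Int) := by
    simp [PySem.List.len, PySem.List.length_pyRange_one]
  rw [hlenR, List.foldl_map]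
  rw [PySem.List.foldl_congr_mem' _ _ (fun acc j => if num_conflicts board j = pvMax board then acc ++ [j] else acc) []]
  · rw [PySem.List.foldl_append_ite_eq_filter (fun g => num_conflicts board g = pvMax board)]
    simp
  · intro j hj acc
    rw [PySem.List.mem_pyRange_one] at hj
    show (if (PySem.List.pyGetD ((PySem.List.pyRange 0 (board.length : Int)).map (fun j => num_conflicts board j)) j 0) = pvMax board
          then acc ++ [j] else acc) = _
    rw [PySem.List.pyGetD_map_pyRange_of_nonneg (fun j => num_conflicts board j) (board.length : Int) j 0 hj.1 hj.2]


-- ===== VERDICT (by name: the statement is the Claim_ definition above) =====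
theorem most_conflicted_rows_spec : Claim_equal_most_conflicted_rows := by
  intro board _
  unfold Spec_most_conflicted_rows
  rw [pv_A_eq, pv_B_eq]
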